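-- pv_equiv track=rewrite | github.com/SobinYim/Algorithm | [Programmers] Lv2/[3차] n진수 게임.py | solution
-- ===== SOURCE A (Python) =====
-- def solution(n, t, m, p): #진법, 미리 구할 숫자의 개수, 게임 참가자 수, 튜브의 순서
--     conv_li=[str(i) for i in range(10)]+list("ABCDEF") #2<=n<=16
--     last=conv_li[n-1] #각 진법의 마지막
--     def fn_plus(conv_n): #n진법 수 conv_n에 +1
--         if conv_n[-1]==last: #마지막 숫자가 last라면
--             if len(conv_n)==1: #들어온 conv_n이 1자리라면 자릿수 올려 10 반환
--                 return "10"
--             else: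
--                 return fn_plus(conv_n[:-1])+"0" #last+1하여 재귀+"0"
--         else:
--             return conv_n[:-1]+conv_li[conv_li.index(conv_n[-1])+1] #last가 아니라면 conv_li에서 다음 숫자를 구해 conv_n+1 반환
--     conv_n,ans="0","0" #n진수로 변환한 수 conv_n, ans
--     while len(ans)<m*t+m: #미리 구할 숫자의 개수를 넘어가기 전까지
--         conv_n=fn_plus(conv_n)
--         ans+=conv_n
--     return ans[p-1::m][:t]
-- ===== SOURCE B (Python) =====
-- def solution(n, t, m, p):
--     digits = "0123456789ABCDEF"
--     def rep(i):  # base-n representation of i via positional divmod recursion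
--         return digits[i] if i < n else rep(i // n) + digits[i % n]
--     ans, i = "0", 0
--     while len(ans) < m * t + m:
--         i += 1
--         ans += rep(i)
--     return ans[p - 1::m][:t]
-- ===== Notes on version B (the rewrite author's own statement) =====
-- stated objective: simpler
-- what changed: Each number is converted to base n independently by a positional divmod recursion instead of incrementing the previous base-n string with a hand-rolled carry (fn_plus with table lookups); the sequence loop then only concatenates rep(i).
-- outside the precondition, e.g. on solution(1, 2, 1, 1): A returns '01', B raises RecursionError; on solution(0, 2, 1, 1): A returns '01', B raises ZeroDivisionError; on solution(-3, 2, 1, 1): A returns '01', B raises RecursionError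
import Mathlib
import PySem

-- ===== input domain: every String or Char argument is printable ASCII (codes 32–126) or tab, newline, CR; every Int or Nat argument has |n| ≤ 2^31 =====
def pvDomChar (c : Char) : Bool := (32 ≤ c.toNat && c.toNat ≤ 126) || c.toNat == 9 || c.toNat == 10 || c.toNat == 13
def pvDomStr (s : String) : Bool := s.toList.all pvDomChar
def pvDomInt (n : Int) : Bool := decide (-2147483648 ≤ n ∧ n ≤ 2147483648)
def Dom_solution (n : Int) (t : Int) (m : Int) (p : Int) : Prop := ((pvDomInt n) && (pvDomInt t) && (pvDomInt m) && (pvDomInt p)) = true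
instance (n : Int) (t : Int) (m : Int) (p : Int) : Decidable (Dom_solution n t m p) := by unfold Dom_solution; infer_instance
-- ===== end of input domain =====

-- B replaces A's string-increment-with-carry (fn_plus) by an independent positional divmod
-- conversion of each number; the ports' equivalence is proved for 2 ≤ n ≤ 16, m ≠ 0.

-- ===== PORT A =====
-- conv_li = [str(i) for i in range(10)] + list("ABCDEF"): every element is a 1-character
-- string, modeled as Char (the flatten glues the singleton char-lists str(i) elementwise).
def convLiA : List Char :=
  ((PySem.List.pyRange 0 10 1).map (fun i => PySem.Int.toChars i)).flatten ++ "ABCDEF".toList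

-- fn_plus; the [] arm is a totality guard (Python raises IndexError on "", never reached
-- from solution, which only passes nonempty strings).  conv_n[:-1] is dropLast
-- (= PySem.List.slice s none (some (-1)), lemma slice_to_neg_one); conv_li.index(x) is
-- PySem.List.index? (getD 0 is unreachable: the looked-up char is always in conv_li).
def fnPlusA (convLi : List Char) (last : Char) : List Char → List Char
  | [] => []
  | a :: tl =>
    if PySem.List.pyGetD (a :: tl) (-1) ' ' = last then
      if (a :: tl).length = 1 then ['1', '0']
      else fnPlusA convLi last (a :: tl).dropLast ++ ['0']
    else
      (a :: tl).dropLast ++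
        [PySem.List.pyGetD convLi
          (((PySem.List.index? convLi (PySem.List.pyGetD (a :: tl) (-1) ' ')).getD 0 : Int) + 1) ' ']
termination_by s => s.length
decreasing_by simp

-- the while loop; fuel (limit.toNat + 1) is a totality guard only: ans grows by at least
-- one character per iteration, so the 0-fuel arm is never reached.  ans is carried
-- REVERSED together with its length (ansRev = ans.reverse, len = len(ans)) purely so that
-- evaluation is linear; the loop, its test and the appended values are Python's.
def loopA (convLi : List Char) (last : Char) (limit : Int) : Nat → List Char → List Char → Int → List Char
  | 0, _, ansRev, _ => ansRev.reverse
  | fuel + 1, conv, ansRev, len =>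
    if len < limit then
      let c := fnPlusA convLi last conv
      loopA convLi last limit fuel c (c.reverse ++ ansRev) (len + c.length)
    else ansRev.reverse

def solution (n : Int) (t : Int) (m : Int) (p : Int) : String :=
  let last := PySem.List.pyGetD convLiA (n - 1) ' '
  let ans := loopA convLiA last (m * t + m) ((m * t + m).toNat + 1) ['0'] ['0'] 1
  String.ofList (PySem.List.slice ((PySem.List.slice? ans (some (p - 1)) none m).getD []) none (some t))

-- ===== PORT B =====
def digitsB : List Char := "0123456789ABCDEF".toList

-- rep(i): fuel bounds the recursion depth (Python's recursion limit; for n ≤ 1, outside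
-- Pre_, Python raises RecursionError) — with fuel > i it is never exhausted for n ≥ 2.
def repB (n : Int) : Nat → Int → List Char
  | 0, _ => []
  | fuel + 1, i =>
    if i < n then [PySem.List.pyGetD digitsB i ' ']
    else repB n fuel (PySem.Int.floordiv i n) ++ [PySem.List.pyGetD digitsB (PySem.Int.mod i n) ' ']

-- same linear-evaluation device as loopA: ans reversed plus its tracked length.
def loopB (n : Int) (limit : Int) : Nat → Int → List Char → Int → List Char
  | 0, _, ansRev, _ => ansRev.reverse
  | fuel + 1, i, ansRev, len =>
    if len < limit then
      let c := repB n ((i + 1).toNat + 1) (i + 1)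
      loopB n limit fuel (i + 1) (c.reverse ++ ansRev) (len + c.length)
    else ansRev.reverse

def solution_alt (n : Int) (t : Int) (m : Int) (p : Int) : String :=
  let ans := loopB n (m * t + m) ((m * t + m).toNat + 1) 0 ['0'] 1
  String.ofList (PySem.List.slice ((PySem.List.slice? ans (some (p - 1)) none m).getD []) none (some t))

-- ===== PRECONDITION & SPEC =====
-- Pre_ excludes m = 0 (both raise ValueError: slice step zero) and n outside 2..16 (for
-- n > 16 or n < -15 A raises IndexError; for -15 ≤ n ≤ 1, A's returned value is an artefact
-- of negative-index wraparound in conv_li / a degenerate base, and B's recursive converter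
-- raises RecursionError or ZeroDivisionError there) — except when m*t+m ≤ 1, where the
-- sequence loop never runs and both merely slice "0", so -15 ≤ n ≤ 16 stays admitted.
def Pre_solution (n : Int) (t : Int) (m : Int) (p : Int) : Prop :=
  m ≠ 0 ∧ (2 ≤ n ∧ n ≤ 16 ∨ (-15 ≤ n ∧ n ≤ 16 ∧ m * t + m ≤ 1))
instance (n : Int) (t : Int) (m : Int) (p : Int) : Decidable (Pre_solution n t m p) := by
  unfold Pre_solution; infer_instance

def pvWitness_solution : Int × Int × Int × Int := (2, 4, 2, 1)

def Spec_solution (n : Int) (t : Int) (m : Int) (p : Int) (out : String) : Prop := out = solution_alt n t m p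
instance (n : Int) (t : Int) (m : Int) (p : Int) (out : String) : Decidable (Spec_solution n t m p out) := by unfold Spec_solution; infer_instance

-- ===== CLAIM (what is proved, stated in full; the proofs are below) =====
def Claim_equal_solution : Prop := ∀ (n : Int) (t : Int) (m : Int) (p : Int), Dom_solution n t m p → Pre_solution n t m p → Spec_solution n t m p (solution n t m p)

-- ===== LEMMAS AND PROOFS =====

-- proof-side clean base-n converter (Nat, 2 ≤ N assumed)
def repb (N : Nat) (hN : 2 ≤ N) (i : Nat) : List Char :=
  if _ : i < N then [digitsB.getD i ' ']
  else repb N hN (i / N) ++ [digitsB.getD (i % N) ' ']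
termination_by i
decreasing_by exact Nat.div_lt_self (by omega) hN

lemma convLiA_eq : convLiA = digitsB := by
  show ((PySem.List.pyRange 0 10 1).map (fun i => PySem.Int.toChars i)).flatten ++ "ABCDEF".toList = _
  norm_num [PySem.List.pyRange, PySem.Int.toChars, PySem.Int.toStr, digitsB, List.range_succ]
  rfl

lemma repb_ne_nil (N : Nat) (hN : 2 ≤ N) (i : Nat) : repb N hN i ≠ [] := by
  unfold repb; split <;> simp

lemma repB_eq_repb (N : Nat) (hN : 2 ≤ N) :
    ∀ (f : Nat) (i : Nat), i < f → repB (N : Int) f (i : Int) = repb N hN i := by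
  intro f
  induction f with
  | zero => intro i hi; omega
  | succ f ih =>
    intro i hi
    rw [repB, repb]
    by_cases h : i < N
    · simp [h, PySem.List.pyGetD_natCast]
    · have hiN : N ≤ i := by omega
      rw [if_neg (by exact_mod_cast h), dif_neg h]
      rw [PySem.Int.floordiv_natCast, PySem.Int.mod_natCast, PySem.List.pyGetD_natCast]
      have : i / N < f := by
        have : i / N < i := Nat.div_lt_self (by omega) hN
        omega
      rw [ih (i / N) this]

lemma dig_index (d : Nat) (hd : d < 16) :
    PySem.List.index? digitsB (digitsB.getD d ' ') = some d := by
  interval_cases d <;> decide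
lemma dig_inj' : ∀ a < 16, ∀ b < 16, digitsB.getD a ' ' = digitsB.getD b ' ' → a = b := by decide
lemma dig_inj (a b : Nat) (ha : a < 16) (hb : b < 16)
    (h : digitsB.getD a ' ' = digitsB.getD b ' ') : a = b := dig_inj' a ha b hb h
lemma carry (N : Nat) (hN : 2 ≤ N) (h16 : N ≤ 16) :
    ∀ i : Nat, fnPlusA digitsB (digitsB.getD (N - 1) ' ') (repb N hN i) = repb N hN (i + 1) := by
  intro i
  induction i using Nat.strong_induction_on with
  | _ i ih =>
  by_cases hi : i < N
  · -- repb i = [dig i]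
    rw [repb, dif_pos hi]
    rw [fnPlusA]
    have hget : PySem.List.pyGetD [digitsB.getD i ' '] (-1) ' ' = digitsB.getD i ' ' := by
      simpa using PySem.List.pyGetD_neg_one_append_singleton (xs := []) (x := digitsB.getD i ' ') (d := ' ')
    by_cases hlastd : i = N - 1
    · rw [if_pos (by rw [hget, hlastd]),
          if_pos (show ([digitsB.getD i ' '] : List Char).length = 1 by simp)]
      have hi1 : i + 1 = N := by omega
      rw [hi1, repb, dif_neg (by omega), Nat.div_self (by omega : 0 < N), Nat.mod_self,
          repb, dif_pos (by omega : 1 < N)]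
      decide
    · rw [if_neg (by rw [hget]; intro h; exact hlastd (dig_inj _ _ (by omega) (by omega) h))]
      rw [hget]
      rw [dig_index i (by omega)]
      simp only [Option.getD_some]
      have : ((i : Int) + 1) = ((i + 1 : Nat) : Int) := by push_cast; ring
      rw [this, PySem.List.pyGetD_natCast]
      rw [repb, dif_pos (by omega : i + 1 < N)]
      simp
  · -- repb i = repb (i/N) ++ [dig (i%N)]
    rw [Nat.not_lt] at hi
    have hq := Nat.div_add_mod i N
    set q := i / N with hq'
    set r := i % N with hr'
    have hrN : r < N := Nat.mod_lt _ (by omega)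
    rw [repb, dif_neg (by omega)]
    obtain ⟨a, tl, hcons⟩ : ∃ a tl, repb N hN q = a :: tl := by
      cases h : repb N hN q with
      | nil => exact absurd h (repb_ne_nil N hN q)
      | cons a tl => exact ⟨a, tl, rfl⟩
    rw [hcons]
    have hget : PySem.List.pyGetD ((a :: tl) ++ [digitsB.getD r ' ']) (-1) ' ' = digitsB.getD r ' ' :=
      PySem.List.pyGetD_neg_one_append_singleton (xs := a :: tl) (x := _) (d := ' ')
    rw [show (a :: tl) ++ [digitsB.getD r ' '] = a :: (tl ++ [digitsB.getD r ' ']) from rfl]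
    rw [fnPlusA]
    rw [show a :: (tl ++ [digitsB.getD r ' ']) = (a :: tl) ++ [digitsB.getD r ' '] from rfl]
    rw [hget]
    by_cases hlastd : r = N - 1
    · rw [if_pos (by rw [hlastd]), if_neg (by simp)]
      rw [List.dropLast_concat]
      have hqlt : q < i := by
        have : 0 < i := by omega
        exact hq' ▸ Nat.div_lt_self this hN
      rw [← hcons, ih q hqlt]
      -- rhs: repb (i+1) with i+1 = N*(q+1)
      have hi1 : i + 1 = N * (q + 1) := by rw [Nat.mul_add, Nat.mul_one]; omega
      conv_rhs => rw [repb]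
      rw [dif_neg (show ¬ i + 1 < N by omega)]
      have hdiv : (i + 1) / N = q + 1 := by rw [hi1]; exact Nat.mul_div_cancel_left _ (by omega)
      have hmod : (i + 1) % N = 0 := by rw [hi1]; exact Nat.mul_mod_right _ _
      rw [hdiv, hmod]
      rfl
    · rw [if_neg (by intro h; exact hlastd (dig_inj _ _ (by omega) (by omega) h))]
      rw [List.dropLast_concat]
      rw [dig_index r (by omega)]
      simp only [Option.getD_some]
      have : ((r : Int) + 1) = ((r + 1 : Nat) : Int) := by push_cast; ring
      rw [this, PySem.List.pyGetD_natCast]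
      rw [repb, dif_neg (by omega)]
      have hi1 : i + 1 = N * q + (r + 1) := by omega
      have hdiv : (i + 1) / N = q := by rw [hi1, Nat.mul_add_div (by omega)]; rw [Nat.div_eq_of_lt (by omega)]; omega
      have hmod : (i + 1) % N = r + 1 := by rw [hi1, Nat.mul_add_mod]; exact Nat.mod_eq_of_lt (by omega)
      rw [hdiv, hmod, hcons]

lemma loop_eq (N : Nat) (hN : 2 ≤ N) (h16 : N ≤ 16) (limit : Int) :
    ∀ (fuel : Nat) (k : Nat) (ansRev : List Char) (len : Int),
      loopA digitsB (digitsB.getD (N - 1) ' ') limit fuel (repb N hN k) ansRev len =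
      loopB (N : Int) limit fuel (k : Int) ansRev len := by
  intro fuel
  induction fuel with
  | zero => intro k ansRev len; rfl
  | succ fuel ih =>
    intro k ansRev len
    rw [loopA, loopB]
    by_cases h : len < limit
    · rw [if_pos h, if_pos h]
      have hcast : ((k : Int) + 1) = ((k + 1 : Nat) : Int) := by push_cast; ring
      rw [hcast, Int.toNat_natCast]
      show loopA digitsB (digitsB.getD (N - 1) ' ') limit fuel
            (fnPlusA digitsB (digitsB.getD (N - 1) ' ') (repb N hN k))
            ((fnPlusA digitsB (digitsB.getD (N - 1) ' ') (repb N hN k)).reverse ++ ansRev)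
            (len + (fnPlusA digitsB (digitsB.getD (N - 1) ' ') (repb N hN k)).length) = _
      rw [carry N hN h16 k]
      rw [repB_eq_repb N hN (k + 1 + 1) (k + 1) (by omega)]
      exact ih (k + 1) ((repb N hN (k + 1)).reverse ++ ansRev) (len + (repb N hN (k + 1)).length)
    · rw [if_neg h, if_neg h]

lemma loop_stop (convLi : List Char) (last : Char) (limit : Int) (h : ¬ (1 : Int) < limit)
    (f : Nat) : loopA convLi last limit (f + 1) ['0'] ['0'] 1 = ['0'] := by
  rw [loopA, if_neg h]; rfl

lemma loopB_stop (n limit : Int) (h : ¬ (1 : Int) < limit) (f : Nat) :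
    loopB n limit (f + 1) 0 ['0'] 1 = ['0'] := by
  rw [loopB, if_neg h]; rfl

-- ===== VERDICT (by name: the statement is the Claim_ definition above) =====
theorem solution_spec : Claim_equal_solution := by
  intro n t m p _hdom hpre
  obtain ⟨_hm, hpre⟩ := hpre
  rcases hpre with ⟨h2, h16⟩ | ⟨_, _, hlim⟩
  case inr =>
    -- the loop never runs on either side: both return the slices of "0"
    unfold Spec_solution solution solution_alt
    have hA := loop_stop convLiA (PySem.List.pyGetD convLiA (n - 1) ' ') (m * t + m)
      (by omega) (m * t + m).toNat
    have hB := loopB_stop n (m * t + m) (by omega) (m * t + m).toNat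
    show String.ofList (PySem.List.slice ((PySem.List.slice? (loopA convLiA
          (PySem.List.pyGetD convLiA (n - 1) ' ') (m * t + m) ((m * t + m).toNat + 1) ['0'] ['0'] 1)
          (some (p - 1)) none m).getD []) none (some t)) = _
    rw [hA, hB]
  unfold Spec_solution solution solution_alt
  set N := n.toNat with hNdef
  have hn : n = (N : Int) := by omega
  have hN2 : 2 ≤ N := by omega
  have hN16 : N ≤ 16 := by omega
  have hlast : PySem.List.pyGetD convLiA (n - 1) ' ' = digitsB.getD (N - 1) ' ' := by
    rw [convLiA_eq, hn]
    rw [show ((N : Int) - 1) = ((N - 1 : Nat) : Int) by omega, PySem.List.pyGetD_natCast]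
  have h0 : (['0'] : List Char) = repb N hN2 0 := by
    rw [repb, dif_pos (show 0 < N by omega)]
    decide
  have hA : loopA convLiA (PySem.List.pyGetD convLiA (n - 1) ' ')
        (m * t + m) ((m * t + m).toNat + 1) ['0'] ['0'] 1 =
      loopB n (m * t + m) ((m * t + m).toNat + 1) 0 ['0'] 1 := by
    rw [hlast, convLiA_eq, hn]
    have hk := loop_eq N hN2 hN16 (m * t + m) ((m * t + m).toNat + 1) 0 ['0'] 1
    rw [← h0] at hk
    simpa using hk
  show String.ofList (PySem.List.slice ((PySem.List.slice? (loopA convLiA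
        (PySem.List.pyGetD convLiA (n - 1) ' ') (m * t + m) ((m * t + m).toNat + 1) ['0'] ['0'] 1)
        (some (p - 1)) none m).getD []) none (some t)) = _
  rw [hA]
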